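-- pv_equiv track=rewrite | github.com/Tng20042005/CodeForces | DailyCodeForces/1097B_1200.py | dfs
-- ===== SOURCE A (Python) =====
-- def dfs(i, total, n, arr):
--     if i == n:
--         return total % 360 == 0
--     if dfs(i+1, total + arr[i],n, arr):
--         return True
--     if dfs(i+1, total - arr[i], n, arr):
--         return True
--     return False
-- ===== SOURCE B (Python) =====
-- def dfs(i, total, n, arr):
--     reach = {total % 360}
--     j = i
--     while j != n:
--         a = arr[j]
--         reach = {(r + a) % 360 for r in reach} | {(r - a) % 360 for r in reach}
--         j += 1
--     return 0 in reach
-- ===== Notes on version B (the rewrite author's own statement) =====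
-- stated objective: alternative
-- what changed: replaces the exponential sign-choice recursion with an iterative DP that maintains the set of reachable residues mod 360, adding +/- each element once
import Mathlib
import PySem

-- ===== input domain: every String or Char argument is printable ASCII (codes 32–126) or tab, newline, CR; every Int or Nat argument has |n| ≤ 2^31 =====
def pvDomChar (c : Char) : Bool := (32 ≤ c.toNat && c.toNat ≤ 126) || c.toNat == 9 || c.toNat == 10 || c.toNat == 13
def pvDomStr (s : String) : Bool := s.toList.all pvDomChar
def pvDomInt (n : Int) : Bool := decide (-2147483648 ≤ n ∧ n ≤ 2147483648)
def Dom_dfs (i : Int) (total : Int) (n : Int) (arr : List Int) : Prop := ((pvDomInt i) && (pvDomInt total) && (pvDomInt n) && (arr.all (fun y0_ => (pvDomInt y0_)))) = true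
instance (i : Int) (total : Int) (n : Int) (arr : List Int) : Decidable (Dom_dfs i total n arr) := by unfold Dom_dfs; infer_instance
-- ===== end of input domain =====

-- B replaces A's sign-choice recursion by an iterative DP over the set of reachable residues mod 360.

-- ===== PORT A =====
-- fuel = remaining recursion depth; inside Pre_ the recursion depth is (n - i), so the
-- wrapper's fuel suffices and the port computes exactly what A computes wherever A returns.
def dfsA : Nat → Int → Int → Int → List Int → Bool
  | 0, _, _, _, _ => false
  | f + 1, i, total, n, arr =>
    if i = n then PySem.Int.mod total 360 == 0
    else
      match PySem.List.pyGet? arr i with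
      | none => false
      | some a =>
        if dfsA f (i + 1) (total + a) n arr then true
        else if dfsA f (i + 1) (total - a) n arr then true
        else false

def dfs (i : Int) (total : Int) (n : Int) (arr : List Int) : Bool :=
  dfsA ((n - i).toNat + 1) i total n arr

-- ===== PORT B =====
-- one DP step: reach := {(r+a)%360 for r in reach} | {(r-a)%360 for r in reach}
def stepB (a : Int) (reach : PySem.Set Int) : PySem.Set Int :=
  PySem.Set.union (PySem.Set.ofList (reach.map (fun r => PySem.Int.mod (r + a) 360)))
    (reach.map (fun r => PySem.Int.mod (r - a) 360))

-- the loop 'while j != n: a = arr[j]; reach = …; j += 1'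
-- fuel = remaining iterations; inside Pre_ the loop runs (n - j) times, so the wrapper's
-- fuel suffices; none = IndexError on arr[j] (or fuel exhausted, unreachable inside Pre_)
def loopB (arr : List Int) (n : Int) : Nat → Int → PySem.Set Int → Option (PySem.Set Int)
  | 0, _, _ => none
  | f + 1, j, reach =>
    if j = n then some reach
    else
      match PySem.List.pyGet? arr j with
      | none => none
      | some a => loopB arr n f (j + 1) (stepB a reach)

def dfs_alt (i : Int) (total : Int) (n : Int) (arr : List Int) : Bool :=
  match loopB arr n ((n - i).toNat + 1) i (PySem.Set.ofList [PySem.Int.mod total 360]) with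
  | none => false
  | some reach => reach.contains 0

-- ===== PRECONDITION & SPEC =====
-- Pre_ = exactly the inputs on which A returns: the recursion walks indices i..n-1, so A
-- raises IndexError unless i ≤ n and (when the walk is nonempty) all of i..n-1 are valid
-- (possibly negative, wrapping) indices into arr.
def Pre_dfs (i : Int) (total : Int) (n : Int) (arr : List Int) : Prop :=
  i ≤ n ∧ (i < n → (-(arr.length : Int) ≤ i ∧ n ≤ (arr.length : Int)))
instance (i : Int) (total : Int) (n : Int) (arr : List Int) : Decidable (Pre_dfs i total n arr) := by unfold Pre_dfs; infer_instance
def pvWitness_dfs : Int × Int × Int × List Int := (0, 0, 2, [300, 60])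

def Spec_dfs (i : Int) (total : Int) (n : Int) (arr : List Int) (out : Bool) : Prop := out = dfs_alt i total n arr
instance (i : Int) (total : Int) (n : Int) (arr : List Int) (out : Bool) : Decidable (Spec_dfs i total n arr out) := by unfold Spec_dfs; infer_instance

-- ===== CLAIM (what is proved, stated in full; the proofs are below) =====
def Claim_equal_dfs : Prop := ∀ (i : Int) (total : Int) (n : Int) (arr : List Int), Dom_dfs i total n arr → Pre_dfs i total n arr → Spec_dfs i total n arr (dfs i total n arr)

-- ===== LEMMAS AND PROOFS =====

-- the signed-choice function both programs compute, abstracted over the element list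
def sigA : List Int → Int → Bool
  | [], t => PySem.Int.mod t 360 == 0
  | a :: xs, t => sigA xs (t + a) || sigA xs (t - a)

theorem sigA_congr (xs : List Int) : ∀ t t' : Int,
    PySem.Int.mod t 360 = PySem.Int.mod t' 360 → sigA xs t = sigA xs t' := by
  induction xs with
  | nil =>
    intro t t' h
    simp only [sigA]
    rw [h]
  | cons a xs ih =>
    intro t t' h
    rw [PySem.Int.mod_eq_emod_of_pos (by omega), PySem.Int.mod_eq_emod_of_pos (by omega)] at h
    simp only [sigA]
    rw [ih (t + a) (t' + a), ih (t - a) (t' - a)] <;>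
      · rw [PySem.Int.mod_eq_emod_of_pos (by omega), PySem.Int.mod_eq_emod_of_pos (by omega)]
        omega

theorem sigA_mod (xs : List Int) (t : Int) : sigA xs (PySem.Int.mod t 360) = sigA xs t := by
  apply sigA_congr
  rw [PySem.Int.mod_eq_emod_of_pos (by omega : (0:Int) < 360),
      PySem.Int.mod_eq_emod_of_pos (by omega : (0:Int) < 360)]
  omega

theorem mem_stepB {x : Int} {a : Int} {reach : PySem.Set Int}
    (hx : x ∈ stepB a reach) : PySem.Int.mod x 360 = x := by
  unfold stepB at hx
  rw [PySem.Set.mem_union] at hx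
  rcases hx with hx | hx
  · rw [PySem.Set.mem_ofList] at hx
    rcases List.mem_map.mp hx with ⟨r, _, rfl⟩
    rw [PySem.Int.mod_eq_emod_of_pos (by omega)]
    rw [PySem.Int.mod_eq_emod_of_pos (by omega)]
    omega
  · rcases List.mem_map.mp hx with ⟨r, _, rfl⟩
    rw [PySem.Int.mod_eq_emod_of_pos (by omega)]
    rw [PySem.Int.mod_eq_emod_of_pos (by omega)]
    omega

-- core DP correctness: after folding stepB over xs, 0 is reachable iff some residue in
-- the start set can be completed by a signed sum of xs to a multiple of 360
theorem foldB_contains (xs : List Int) : ∀ reach : PySem.Set Int,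
    (∀ r ∈ reach, PySem.Int.mod r 360 = r) →
    (xs.foldl (fun s a => stepB a s) reach).contains 0 = reach.any (fun r => sigA xs r) := by
  induction xs with
  | nil =>
    intro reach hInv
    simp only [List.foldl_nil]
    rw [Bool.eq_iff_iff, PySem.Set.contains_iff]
    simp only [List.any_eq_true, sigA, beq_iff_eq]
    constructor
    · intro h0
      exact ⟨0, h0, by decide⟩
    · rintro ⟨r, hr, hmod⟩
      have := hInv r hr
      rw [hmod] at this
      rwa [this]
  | cons a xs ih =>
    intro reach hInv
    rw [List.foldl_cons, ih (stepB a reach) (fun x hx => mem_stepB hx)]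
    rw [Bool.eq_iff_iff]
    simp only [List.any_eq_true, sigA, Bool.or_eq_true]
    constructor
    · rintro ⟨x, hx, hsig⟩
      unfold stepB at hx
      rw [PySem.Set.mem_union] at hx
      rcases hx with hx | hx
      · rw [PySem.Set.mem_ofList] at hx
        rcases List.mem_map.mp hx with ⟨r, hr, rfl⟩
        rw [sigA_mod] at hsig
        exact ⟨r, hr, Or.inl hsig⟩
      · rcases List.mem_map.mp hx with ⟨r, hr, rfl⟩
        rw [sigA_mod] at hsig
        exact ⟨r, hr, Or.inr hsig⟩
    · rintro ⟨r, hr, hsig | hsig⟩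
      · refine ⟨PySem.Int.mod (r + a) 360, ?_, by rw [sigA_mod]; exact hsig⟩
        unfold stepB
        rw [PySem.Set.mem_union]
        exact Or.inl ((PySem.Set.mem_ofList _ _).mpr (List.mem_map.mpr ⟨r, hr, rfl⟩))
      · refine ⟨PySem.Int.mod (r - a) 360, ?_, by rw [sigA_mod]; exact hsig⟩
        unfold stepB
        rw [PySem.Set.mem_union]
        exact Or.inr (List.mem_map.mpr ⟨r, hr, rfl⟩)

-- the while-loop with lookups = the pure fold over the looked-up elements arr[j..n-1],
-- given enough fuel and valid indices
theorem loopB_eq (n : Int) (arr : List Int)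
    (hpre : ∀ j : Int, j < n → -(arr.length : Int) ≤ j → PySem.List.pyGet? arr j ≠ none) :
    ∀ (f : Nat) (j : Int) (reach : PySem.Set Int), j ≤ n → (j < n → -(arr.length : Int) ≤ j) →
      (n - j).toNat < f →
      loopB arr n f j reach =
        some (((PySem.List.pyRange j n 1).map (fun k => (PySem.List.pyGet? arr k).getD 0)).foldl
          (fun s a => stepB a s) reach) := by
  intro f
  induction f with
  | zero => intro j reach _ _ hf; omega
  | succ f ih =>
    intro j reach hjn hlow hf
    by_cases hj : j = n
    · subst hj
      rw [PySem.List.pyRange_one_eq_nil (le_refl _)]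
      simp [loopB]
    · have hlt : j < n := lt_of_le_of_ne hjn hj
      have hget := hpre j hlt (hlow hlt)
      rcases hv : PySem.List.pyGet? arr j with _ | a
      · exact absurd hv hget
      · rw [PySem.List.pyRange_one_cons hlt]
        simp only [loopB, if_neg hj, hv, List.map_cons, List.foldl_cons, Option.getD_some]
        exact ih (j + 1) (stepB a reach) (by omega) (fun _ => by omega) (by omega)

-- A's recursion = sigA over the elements arr[i..n-1], given enough fuel and Pre_
theorem dfsA_eq_sigA (n : Int) (arr : List Int)
    (hpre : ∀ j : Int, j < n → -(arr.length : Int) ≤ j → PySem.List.pyGet? arr j ≠ none) :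
    ∀ (f : Nat) (i t : Int), i ≤ n → (i < n → -(arr.length : Int) ≤ i) →
      (n - i).toNat < f →
      dfsA f i t n arr = sigA ((PySem.List.pyRange i n 1).map (fun j => (PySem.List.pyGet? arr j).getD 0)) t := by
  intro f
  induction f with
  | zero => intro i t _ _ hf; omega
  | succ f ih =>
    intro i t hin hlow hf
    by_cases hi : i = n
    · subst hi
      rw [PySem.List.pyRange_one_eq_nil (le_refl _)]
      simp [dfsA, sigA]
    · have hlt : i < n := lt_of_le_of_ne hin hi
      have hlo := hlow hlt
      have hget := hpre i hlt hlo
      rcases hv : PySem.List.pyGet? arr i with _ | a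
      · exact absurd hv hget
      · have hrange : PySem.List.pyRange i n 1 = i :: PySem.List.pyRange (i + 1) n 1 :=
          PySem.List.pyRange_one_cons hlt
        rw [hrange]
        simp only [dfsA, if_neg hi, hv, List.map_cons, Option.getD_some, sigA]
        rw [ih (i + 1) (t + a) (by omega) (fun _ => by omega) (by omega),
            ih (i + 1) (t - a) (by omega) (fun _ => by omega) (by omega)]
        cases sigA ((PySem.List.pyRange (i + 1) n 1).map (fun j => (PySem.List.pyGet? arr j).getD 0)) (t + a) <;>
          cases sigA ((PySem.List.pyRange (i + 1) n 1).map (fun j => (PySem.List.pyGet? arr j).getD 0)) (t - a) <;> rfl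

-- ===== VERDICT (by name: the statement is the Claim_ definition above) =====
theorem dfs_spec : Claim_equal_dfs := by
  intro i total n arr _ hpre
  obtain ⟨hin, hb⟩ := hpre
  unfold Spec_dfs dfs dfs_alt
  have hsingle : PySem.Set.ofList [PySem.Int.mod total 360] = [PySem.Int.mod total 360] := rfl
  have hmodmod : PySem.Int.mod (PySem.Int.mod total 360) 360 = PySem.Int.mod total 360 := by
    rw [PySem.Int.mod_eq_emod_of_pos (by omega)]
    rw [PySem.Int.mod_eq_emod_of_pos (by omega)]
    omega
  by_cases hik : i < n
  · obtain ⟨hlo, hhi⟩ := hb hik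
    have hall : ∀ j : Int, j < n → -(arr.length : Int) ≤ j → PySem.List.pyGet? arr j ≠ none := by
      intro j hj hjlo
      rw [Ne, PySem.List.pyGet?_eq_none_iff, not_not]
      exact ⟨hjlo, by omega⟩
    rw [loopB_eq n arr hall _ i _ hin (fun _ => hlo) (by omega)]
    dsimp only
    rw [foldB_contains _ _ ?_]
    · rw [dfsA_eq_sigA n arr hall _ i total hin (fun _ => hlo) (by omega)]
      rw [Bool.eq_iff_iff, hsingle]
      simp only [List.any_eq_true]
      constructor
      · intro h
        exact ⟨PySem.Int.mod total 360, List.mem_singleton_self _, by rw [sigA_mod]; exact h⟩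
      · rintro ⟨r, hr, hs⟩
        rw [List.mem_singleton] at hr
        subst hr
        rwa [sigA_mod] at hs
    · intro r hr
      rw [hsingle, List.mem_singleton] at hr
      subst hr
      exact hmodmod
  · have hie : i = n := le_antisymm hin (by omega)
    subst hie
    have hf : (i - i).toNat + 1 = 1 := by omega
    rw [hf]
    simp only [loopB, dfsA, if_true, hsingle]
    rw [Bool.eq_iff_iff, PySem.Set.contains_iff, List.mem_singleton, beq_iff_eq]
    constructor
    · intro h; omega
    · intro h; omega
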